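-- pv_equiv track=rewrite | github.com/vladvvtesla/master-checking | get_zitems/get_ccd_last_imtype.py | get_lastimid
-- ===== SOURCE A (Python) =====
-- def get_lastimid(table_dict, sitename, tube='WEST'):
--     """
--     Get the latest image id
--     :param table_dict: dict, where key is a image id, and value is dict with image's parameters
--     :param tube: 'WEST' or 'EAST'
--     :return last_im_id:  the latest image id
--     """
--     onetubeimdict = {}
--     for key in table_dict.keys():
--         # Special case for MASTER-OAFA, where im_tube=''
--         if sitename == 'MASTER-OAFA' and tube == 'EAST':
--             onetubeimdict[key] = table_dict[key]
--         # For all other sites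
--         else:
--             # Del escape characters
--             ttube = ''.join(table_dict[key]['im_tube'].split())
--             if ttube == tube:
--                 onetubeimdict[key] = table_dict[key]
--
--     if onetubeimdict:
--         id = max(onetubeimdict.keys())
--     else:
--         id = None
--
--     return id
-- ===== SOURCE B (Python) =====
-- def get_lastimid(table_dict, sitename, tube='WEST'):
--     """Latest matching image id: scan ids in descending sorted order, return the first match."""
--     special = sitename == 'MASTER-OAFA' and tube == 'EAST'
--     for k in sorted(table_dict.keys(), reverse=True):
--         if special or ''.join(table_dict[k]['im_tube'].split()) == tube:
--             return k
--     return None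
-- ===== Notes on version B (the rewrite author's own statement) =====
-- stated objective: alternative
-- what changed: B sorts the ids in descending order and returns the first id passing the tube filter (early exit), instead of A's build-a-filtered-sub-dict pass followed by max() over its keys.
import Mathlib
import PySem

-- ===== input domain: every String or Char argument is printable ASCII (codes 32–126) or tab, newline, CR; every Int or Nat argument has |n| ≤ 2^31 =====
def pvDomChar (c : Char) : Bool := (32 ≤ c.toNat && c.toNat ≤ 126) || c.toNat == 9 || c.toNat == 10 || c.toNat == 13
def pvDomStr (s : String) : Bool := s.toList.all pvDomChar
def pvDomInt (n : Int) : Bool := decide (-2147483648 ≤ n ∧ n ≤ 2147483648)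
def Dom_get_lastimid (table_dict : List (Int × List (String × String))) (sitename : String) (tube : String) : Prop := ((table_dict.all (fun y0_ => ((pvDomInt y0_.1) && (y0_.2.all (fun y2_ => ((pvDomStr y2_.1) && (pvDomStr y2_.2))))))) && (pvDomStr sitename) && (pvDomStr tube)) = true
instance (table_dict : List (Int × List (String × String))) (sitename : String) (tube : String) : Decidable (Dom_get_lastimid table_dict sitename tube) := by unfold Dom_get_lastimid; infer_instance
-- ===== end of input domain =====

-- B replaces A's "build a filtered sub-dict, then max() over its keys" with "sort the
-- ids descending and return the first one passing the tube filter"; return values agree on Pre_.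

-- ===== PORT A =====
def get_lastimid (table_dict : List (Int × List (String × String))) (sitename : String) (tube : String) : Option Int :=
  let d := PySem.Dict.ofList table_dict
  let onetubeimdict :=
    d.keys.foldl (fun (ot : PySem.Dict Int (List (String × String))) key =>
      if sitename == "MASTER-OAFA" && tube == "EAST" then
        ot.insert key (d.getD key [])
      else
        let ttube := PySem.Str.join "" (PySem.Str.split₀ ((PySem.Dict.ofList (d.getD key [])).getD "im_tube" ""))
        if ttube == tube then ot.insert key (d.getD key []) else ot)
      PySem.Dict.empty
  if onetubeimdict.size ≠ 0 then PySem.List.max? onetubeimdict.keys (fun x => x) else none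

-- ===== PORT B =====
def get_lastimid_alt (table_dict : List (Int × List (String × String))) (sitename : String) (tube : String) : Option Int :=
  let d := PySem.Dict.ofList table_dict
  let special := sitename == "MASTER-OAFA" && tube == "EAST"
  (PySem.List.sorted d.keys (fun x => x) true).find? (fun k =>
    special || (PySem.Str.join "" (PySem.Str.split₀ ((PySem.Dict.ofList (d.getD k [])).getD "im_tube" "")) == tube))

-- ===== PRECONDITION & SPEC =====
-- Pre_ excludes exactly the inputs where A raises KeyError: outside the MASTER-OAFA/EAST
-- special case, some stored image record has no 'im_tube' key (B raises there too).
def Pre_get_lastimid (table_dict : List (Int × List (String × String))) (sitename : String) (tube : String) : Prop :=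
  (sitename = "MASTER-OAFA" ∧ tube = "EAST") ∨
  ∀ v ∈ (PySem.Dict.ofList table_dict).values, (PySem.Dict.ofList v).contains "im_tube" = true
instance (table_dict : List (Int × List (String × String))) (sitename : String) (tube : String) : Decidable (Pre_get_lastimid table_dict sitename tube) := by unfold Pre_get_lastimid; infer_instance

def pvWitness_get_lastimid : (List (Int × List (String × String))) × String × String :=
  ([(3, [("im_tube", " WEST ")]), (7, [("im_tube", "EAST")]), (5, [("im_tube", "WEST")])], "MASTER-Tunka", "WEST")

def Spec_get_lastimid (table_dict : List (Int × List (String × String))) (sitename : String) (tube : String) (out : Option Int) : Prop := out = get_lastimid_alt table_dict sitename tube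
instance (table_dict : List (Int × List (String × String))) (sitename : String) (tube : String) (out : Option Int) : Decidable (Spec_get_lastimid table_dict sitename tube out) := by unfold Spec_get_lastimid; infer_instance

-- ===== CLAIM (what is proved, stated in full; the proofs are below) =====
def Claim_equal_get_lastimid : Prop := ∀ (table_dict : List (Int × List (String × String))) (sitename : String) (tube : String), Dom_get_lastimid table_dict sitename tube → Pre_get_lastimid table_dict sitename tube → Spec_get_lastimid table_dict sitename tube (get_lastimid table_dict sitename tube)

-- ===== LEMMAS AND PROOFS =====

-- max? (with the identity key) is invariant under permutation
lemma max?_perm_id {A B : List Int} (h : A.Perm B) :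
    PySem.List.max? A (fun x => x) = PySem.List.max? B (fun x => x) := by
  cases hA : PySem.List.max? A (fun x => x) with
  | none =>
    have : A = [] := (PySem.List.max?_eq_none_iff A _).mp hA
    subst this
    have : B = [] := h.nil_eq.symm
    subst this
    exact ((PySem.List.max?_eq_none_iff [] _).mpr rfl).symm
  | some m =>
    cases hB : PySem.List.max? B (fun x => x) with
    | none =>
      have hBnil : B = [] := (PySem.List.max?_eq_none_iff B _).mp hB
      subst hBnil
      have : A = [] := h.eq_nil
      subst this
      simp [(PySem.List.max?_eq_none_iff ([] : List Int) (fun x => x)).mpr rfl] at hA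
    | some m' =>
      have hmA : m ∈ A := PySem.List.max?_mem hA
      have hmB : m' ∈ B := PySem.List.max?_mem hB
      have h1 : m ≤ m' := PySem.List.max?_isMax hB m (h.mem_iff.mp hmA)
      have h2 : m' ≤ m := PySem.List.max?_isMax hA m' (h.symm.mem_iff.mp hmB)
      exact congrArg some (le_antisymm h1 h2)

-- on a descending-sorted list, max? is the head
lemma max?_of_desc (t : List Int) (hp : t.Pairwise (fun a b => b ≤ a)) :
    PySem.List.max? t (fun x => x) = t.head? := by
  cases t with
  | nil => exact (PySem.List.max?_eq_none_iff _ _).mpr rfl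
  | cons x r =>
    have hx : ∀ y ∈ r, y ≤ x := (List.pairwise_cons.mp hp).1
    cases hm : PySem.List.max? (x :: r) (fun y => y) with
    | none => exact absurd ((PySem.List.max?_eq_none_iff _ _).mp hm) (by simp)
    | some m =>
      have hmem : m ∈ x :: r := PySem.List.max?_mem hm
      have hle : x ≤ m := PySem.List.max?_isMax hm x (by simp)
      have hge : m ≤ x := by
        rcases List.mem_cons.mp hmem with h | h
        · exact le_of_eq h
        · exact hx m h
      simp [le_antisymm hge hle]

-- head of the filtered list = first match
lemma head?_filter_eq_find? (p : Int → Bool) : ∀ (l : List Int), (l.filter p).head? = l.find? p := by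
  intro l
  induction l with
  | nil => rfl
  | cons x r ih =>
    by_cases hx : p x = true <;> simp [hx, ih]

-- CENTRAL LEMMA: max of the matching ids = first match in the descending sort
lemma max?_filter_eq_find?_sorted (p : Int → Bool) (l : List Int) :
    PySem.List.max? (l.filter p) (fun x => x)
      = (PySem.List.sorted l (fun x => x) true).find? p := by
  have hperm : (PySem.List.sorted l (fun x => x) true).Perm l :=
    PySem.List.sorted_perm l (fun x => x) true
  have hpair : (PySem.List.sorted l (fun x => x) true).Pairwise (fun a b => b ≤ a) :=
    PySem.List.sorted_pairwise_rev l (fun x => x)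
  calc PySem.List.max? (l.filter p) (fun x => x)
      = PySem.List.max? ((PySem.List.sorted l (fun x => x) true).filter p) (fun x => x) :=
        max?_perm_id (hperm.filter p).symm
    _ = ((PySem.List.sorted l (fun x => x) true).filter p).head? :=
        max?_of_desc _ (hpair.filter p)
    _ = (PySem.List.sorted l (fun x => x) true).find? p := head?_filter_eq_find? p _

-- keys of A's conditional-insert loop = the filtered key list
lemma keys_condFold (p : Int → Bool) (v : Int → List (String × String)) :
    ∀ (l : List Int) (ot : PySem.Dict Int (List (String × String))),
      (l.foldl (fun ot k => if p k then ot.insert k (v k) else ot) ot).keys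
        = PySem.Set.update ot.keys (l.filter p) := by
  intro l
  induction l with
  | nil => intro ot; simp [PySem.Set.update]
  | cons k rest ih =>
    intro ot
    by_cases hp : p k = true
    · have hkeys : (ot.insert k (v k)).keys = PySem.Set.add ot.keys k := by
        by_cases hc : ot.contains k = true
        · rw [PySem.Dict.keys_insert_of_contains _ _ hc,
              PySem.Set.add_of_mem ((PySem.Dict.contains_iff_mem_keys ot k).mp hc)]
        · rw [PySem.Dict.keys_insert_of_not_contains _ _ (by simpa using hc),
              PySem.Set.add_of_not_mem]
          intro hmem
          exact absurd ((PySem.Dict.contains_iff_mem_keys ot k).mpr hmem) (by simpa using hc)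
      simp only [List.foldl_cons, hp, if_true, List.filter_cons_of_pos hp,
        PySem.Set.update_cons, ih, hkeys]
    · simp only [List.foldl_cons]
      rw [if_neg hp, List.filter_cons_of_neg (by simpa using hp)]
      exact ih ot

lemma keys_len_eq_size (d : PySem.Dict Int (List (String × String))) :
    d.keys.length = d.size := by
  simp [PySem.Dict.keys, PySem.Dict.size]

-- A's conditional-insert branch, as a whole, computes max? over the filtered key list
lemma condFold_result (p : Int → Bool) (v : Int → List (String × String))
    (l : List Int) (hn : l.Nodup) :
    (if (l.foldl (fun (ot : PySem.Dict Int (List (String × String))) k =>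
          if p k then ot.insert k (v k) else ot) PySem.Dict.empty).size ≠ 0
     then PySem.List.max? (l.foldl (fun (ot : PySem.Dict Int (List (String × String))) k =>
          if p k then ot.insert k (v k) else ot) PySem.Dict.empty).keys (fun x => x)
     else none)
      = PySem.List.max? (l.filter p) (fun x => x) := by
  have hkeys : (l.foldl (fun (ot : PySem.Dict Int (List (String × String))) k =>
      if p k then ot.insert k (v k) else ot) PySem.Dict.empty).keys = l.filter p := by
    rw [keys_condFold]
    simp only [PySem.Dict.keys_empty, PySem.Set.update_nil_left]
    exact PySem.Set.ofList_eq_self_of_nodup _ (List.Nodup.filter _ hn)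
  rcases eq_or_ne (l.filter p) [] with hl | hl
  · have hsz : ¬ (l.foldl (fun (ot : PySem.Dict Int (List (String × String))) k =>
        if p k then ot.insert k (v k) else ot) PySem.Dict.empty).size ≠ 0 := by
      rw [← keys_len_eq_size, hkeys, hl]; simp
    rw [if_neg hsz, hl]
    exact ((PySem.List.max?_eq_none_iff _ _).mpr rfl).symm
  · have hsz : (l.foldl (fun (ot : PySem.Dict Int (List (String × String))) k =>
        if p k then ot.insert k (v k) else ot) PySem.Dict.empty).size ≠ 0 := by
      rw [← keys_len_eq_size, hkeys]
      exact fun h => hl (List.length_eq_zero_iff.mp h)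
    rw [if_pos hsz, hkeys]

-- ===== VERDICT (by name: the statement is the Claim_ definition above) =====
theorem get_lastimid_spec : Claim_equal_get_lastimid := by
  intro table_dict sitename tube _hdom _hpre
  unfold Spec_get_lastimid get_lastimid get_lastimid_alt
  set d := PySem.Dict.ofList table_dict with hd
  set cond : Int → Bool := fun k =>
    PySem.Str.join "" (PySem.Str.split₀
      ((PySem.Dict.ofList (d.getD k [])).getD "im_tube" "")) == tube with hcond
  have hnod : d.keys.Nodup := PySem.Dict.nodup_keys_ofList table_dict
  by_cases hs : (sitename == "MASTER-OAFA" && tube == "EAST") = true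
  · simp only [hs, if_true, Bool.true_or]
    have hA := condFold_result (fun _ => true) (fun key => d.getD key []) d.keys hnod
    simp only [if_true] at hA
    rw [hA, max?_filter_eq_find?_sorted (fun _ => true) d.keys]
  · rw [Bool.not_eq_true] at hs
    simp only [hs, Bool.false_eq_true, if_false, Bool.false_or]
    exact condFold_result cond (fun key => d.getD key []) d.keys hnod |>.trans
      (max?_filter_eq_find?_sorted cond d.keys)
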